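-- pv_equiv track=rewrite | github.com/kazcw/miro | tv/lib/filetags.py | _mediatype_from_mime
-- ===== SOURCE A (Python) =====
-- def _mediatype_from_mime(mimes):
--     """Used as a fallback if the extension isn't specific."""
--     types = frozenset(mime.split('/', 2)[0] for mime in mimes)
--     if 'video' in types:
--         return u'video'
--     elif 'audio' in types:
--         return u'audio'
--     elif types.intersection(['other', 'application']):
--         return u'other'
-- ===== SOURCE B (Python) =====
-- def _mediatype_from_mime(mimes):
--     """Used as a fallback if the extension isn't specific."""
--     seen_audio = False
--     seen_other = False
--     for mime in mimes:
--         t = mime.split('/', 2)[0]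
--         if t == 'video':
--             return u'video'
--         elif t == 'audio':
--             seen_audio = True
--         elif t in ('other', 'application'):
--             seen_other = True
--     if seen_audio:
--         return u'audio'
--     elif seen_other:
--         return u'other'
-- ===== Notes on version B (the rewrite author's own statement) =====
-- stated objective: simpler
-- what changed: Single early-exit pass maintaining two booleans instead of building a frozenset of prefixes and querying it three times.
import Mathlib
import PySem

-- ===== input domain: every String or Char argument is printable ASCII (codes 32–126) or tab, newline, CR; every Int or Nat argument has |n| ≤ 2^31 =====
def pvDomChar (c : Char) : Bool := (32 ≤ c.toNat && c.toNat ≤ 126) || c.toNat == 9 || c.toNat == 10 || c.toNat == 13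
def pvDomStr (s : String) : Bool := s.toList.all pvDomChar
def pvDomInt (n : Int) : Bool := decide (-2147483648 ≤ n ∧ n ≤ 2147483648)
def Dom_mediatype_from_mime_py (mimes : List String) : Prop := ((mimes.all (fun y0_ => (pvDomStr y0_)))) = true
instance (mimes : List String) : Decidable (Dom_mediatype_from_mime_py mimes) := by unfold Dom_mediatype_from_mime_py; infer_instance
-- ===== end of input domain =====

-- B replaces A's frozenset-of-prefixes-then-three-queries with a single early-exit pass
-- keeping two booleans (objective: simpler); same return value on every input.


-- ===== PORT A =====
-- mime.split('/', 2)[0]: with a nonempty separator split never returns an empty list,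
-- so headD "" is exact (the [0] index never raises).
def pvSplitHead (mime : String) : String :=
  ((PySem.Str.splitMax? mime "/" 2).getD []).headD ""

def mediatype_from_mime_py (mimes : List String) : Option String :=
  let types : PySem.Set String := PySem.Set.ofList (mimes.map pvSplitHead)
  if PySem.Set.contains types "video" then some "video"
  else if PySem.Set.contains types "audio" then some "audio"
  else if PySem.Set.inter types ["other", "application"] ≠ [] then some "other"
  else none

-- ===== PORT B =====
def pvMediatypeLoop : List String → Bool → Bool → Option String
  | [], seenAudio, seenOther =>
    if seenAudio then some "audio" else if seenOther then some "other" else none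
  | mime :: rest, seenAudio, seenOther =>
    let t := pvSplitHead mime
    if t = "video" then some "video"
    else if t = "audio" then pvMediatypeLoop rest true seenOther
    else if t = "other" ∨ t = "application" then pvMediatypeLoop rest seenAudio true
    else pvMediatypeLoop rest seenAudio seenOther

def mediatype_from_mime_py_alt (mimes : List String) : Option String :=
  pvMediatypeLoop mimes false false

-- ===== PRECONDITION & SPEC =====
def Spec_mediatype_from_mime_py (mimes : List String) (out : Option String) : Prop := out = mediatype_from_mime_py_alt mimes
instance (mimes : List String) (out : Option String) : Decidable (Spec_mediatype_from_mime_py mimes out) := by unfold Spec_mediatype_from_mime_py; infer_instance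

-- ===== CLAIM =====
def Claim_equal_mediatype_from_mime_py : Prop := ∀ (mimes : List String), Dom_mediatype_from_mime_py mimes → Spec_mediatype_from_mime_py mimes (mediatype_from_mime_py mimes)

-- ===== LEMMAS AND PROOFS =====
theorem pvLoop_char (l : List String) (sa so : Bool) :
    pvMediatypeLoop l sa so =
      if "video" ∈ l.map pvSplitHead then some "video"
      else if sa ∨ "audio" ∈ l.map pvSplitHead then some "audio"
      else if so ∨ "other" ∈ l.map pvSplitHead ∨ "application" ∈ l.map pvSplitHead then some "other"
      else none := by
  induction l generalizing sa so with
  | nil => simp [pvMediatypeLoop]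
  | cons m rest ih =>
    show (if pvSplitHead m = "video" then some "video"
      else if pvSplitHead m = "audio" then pvMediatypeLoop rest true so
      else if pvSplitHead m = "other" ∨ pvSplitHead m = "application" then pvMediatypeLoop rest sa true
      else pvMediatypeLoop rest sa so) = _
    by_cases hv : pvSplitHead m = "video"
    · simp [hv]
    · rw [if_neg hv]
      have hv' : ¬ "video" = pvSplitHead m := fun h => hv h.symm
      by_cases ha : pvSplitHead m = "audio"
      · rw [if_pos ha, ih]
        simp [ha]
      · rw [if_neg ha]
        have ha' : ¬ "audio" = pvSplitHead m := fun h => ha h.symm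
        by_cases ho : pvSplitHead m = "other" ∨ pvSplitHead m = "application"
        · rw [if_pos ho, ih]
          rcases ho with ho | ho <;>
            simp [ho, or_comm]
        · rw [if_neg ho, ih]
          rw [not_or] at ho
          have ho1 : ¬ "other" = pvSplitHead m := fun h => ho.1 h.symm
          have ho2 : ¬ "application" = pvSplitHead m := fun h => ho.2 h.symm
          simp [hv', ha', ho1, ho2]

theorem inter_ne_nil_iff (types : PySem.Set String) :
    PySem.Set.inter types ["other", "application"] ≠ [] ↔
      "other" ∈ types ∨ "application" ∈ types := by
  constructor
  · intro h
    rcases List.exists_mem_of_ne_nil _ h with ⟨x, hx⟩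
    have := (PySem.Set.mem_inter types ["other", "application"] x).mp hx
    rcases this with ⟨hxs, hxt⟩
    simp only [List.mem_cons, List.not_mem_nil, or_false] at hxt
    rcases hxt with h1 | h1 <;> subst h1 <;> [exact Or.inl hxs; exact Or.inr hxs]
  · intro h hnil
    rcases h with h | h
    · have : "other" ∈ PySem.Set.inter types ["other", "application"] :=
        (PySem.Set.mem_inter _ _ _).mpr ⟨h, by simp⟩
      simp [hnil] at this
    · have : "application" ∈ PySem.Set.inter types ["other", "application"] :=
        (PySem.Set.mem_inter _ _ _).mpr ⟨h, by simp⟩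
      simp [hnil] at this

-- ===== VERDICT =====
theorem mediatype_from_mime_py_spec : Claim_equal_mediatype_from_mime_py := by
  intro mimes _
  unfold Spec_mediatype_from_mime_py mediatype_from_mime_py mediatype_from_mime_py_alt
  rw [pvLoop_char]
  simp only [PySem.Set.contains_eq_listContains, List.contains_iff_mem,
    inter_ne_nil_iff, PySem.Set.mem_ofList, Bool.false_eq_true, false_or]
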